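-- pv_equiv track=rewrite | github.com/arvind-india/face_mask_detection-1 | deploy/rpi_object_detection_v3.py | get_direction_from_bounding_list
-- ===== SOURCE A (Python) =====
-- def get_direction_from_bounding_list(x_axis_bounding_list):
-- 	# in camera, left to right is x = 0 to x = 400
-- 	# right to left is x = 400 to x = 0
-- 	agg_direction = 0
-- 	for i in range(1, len(x_axis_bounding_list)):
-- 		direction = x_axis_bounding_list[i - 1] - x_axis_bounding_list[i]
-- 		agg_direction = agg_direction + direction
-- 	# right to left
-- 	if agg_direction > 0:
-- 		return 'right_to_left'
-- 	if agg_direction < 0: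
-- 		return 'left_to_right'
-- 	return 'unknown'
-- ===== SOURCE B (Python) =====
-- def get_direction_from_bounding_list(x_axis_bounding_list):
--     # O(1): the loop's sum telescopes to first - last.
--     if not x_axis_bounding_list:
--         return 'unknown'
--     first = x_axis_bounding_list[0]
--     last = x_axis_bounding_list[-1]
--     if first > last:
--         return 'right_to_left'
--     if first < last:
--         return 'left_to_right'
--     return 'unknown'
-- ===== Notes on version B (the rewrite author's own statement) =====
-- stated objective: faster
-- what changed: Replaces the O(n) loop summing consecutive differences with the telescoped closed form: compare the first element with the last (empty list -> 'unknown').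
import Mathlib
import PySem

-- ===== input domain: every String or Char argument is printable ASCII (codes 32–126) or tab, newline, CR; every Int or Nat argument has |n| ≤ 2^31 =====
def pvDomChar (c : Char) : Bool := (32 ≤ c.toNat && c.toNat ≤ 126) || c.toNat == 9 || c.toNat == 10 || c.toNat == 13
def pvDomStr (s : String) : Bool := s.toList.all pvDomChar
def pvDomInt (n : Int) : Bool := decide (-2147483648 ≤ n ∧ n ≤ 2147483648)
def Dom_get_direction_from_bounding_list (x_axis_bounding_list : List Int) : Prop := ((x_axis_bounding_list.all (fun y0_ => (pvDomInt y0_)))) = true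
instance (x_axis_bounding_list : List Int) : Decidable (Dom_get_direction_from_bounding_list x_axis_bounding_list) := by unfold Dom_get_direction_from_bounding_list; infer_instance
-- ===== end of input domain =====

-- B replaces A's O(n) sum of consecutive differences by its telescoped O(1) form: compare first with last element.

-- ===== PORT A =====
def get_direction_from_bounding_list (x_axis_bounding_list : List Int) : String :=
  let agg_direction : Int :=
    (PySem.List.pyRange 1 x_axis_bounding_list.length 1).foldl
      (fun agg i =>
        let direction := PySem.List.pyGetD x_axis_bounding_list (i - 1) 0 -
                         PySem.List.pyGetD x_axis_bounding_list i 0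
        agg + direction) 0
  if agg_direction > 0 then "right_to_left"
  else if agg_direction < 0 then "left_to_right"
  else "unknown"

-- ===== PORT B =====
def get_direction_from_bounding_list_alt (x_axis_bounding_list : List Int) : String :=
  match x_axis_bounding_list with
  | [] => "unknown"
  | first :: rest =>
    let last := rest.getLastD first
    if first > last then "right_to_left"
    else if first < last then "left_to_right"
    else "unknown"

-- ===== PRECONDITION & SPEC =====
def Spec_get_direction_from_bounding_list (x_axis_bounding_list : List Int) (out : String) : Prop := out = get_direction_from_bounding_list_alt x_axis_bounding_list
instance (x_axis_bounding_list : List Int) (out : String) : Decidable (Spec_get_direction_from_bounding_list x_axis_bounding_list out) := by unfold Spec_get_direction_from_bounding_list; infer_instance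

-- ===== CLAIM (what is proved, stated in full; the proofs are below) =====
def Claim_equal_get_direction_from_bounding_list : Prop := ∀ (x_axis_bounding_list : List Int), Dom_get_direction_from_bounding_list x_axis_bounding_list → Spec_get_direction_from_bounding_list x_axis_bounding_list (get_direction_from_bounding_list x_axis_bounding_list)

-- ===== LEMMAS AND PROOFS =====

-- The loop telescopes: the fold over range(j, len) adds xs[j-1] - xs[len-1] to the accumulator.
theorem pv_telescope (xs : List Int) (j acc : Int) (h1 : 1 ≤ j) (h2 : j ≤ xs.length) :
    (PySem.List.pyRange j xs.length 1).foldl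
      (fun agg i => agg + (PySem.List.pyGetD xs (i - 1) 0 - PySem.List.pyGetD xs i 0)) acc
    = acc + (PySem.List.pyGetD xs (j - 1) 0 - PySem.List.pyGetD xs ((xs.length : Int) - 1) 0) := by
  by_cases h : j < xs.length
  · rw [PySem.List.pyRange_one_cons h]
    simp only [List.foldl_cons]
    rw [pv_telescope xs (j + 1) _ (by omega) (by omega)]
    simp only [add_sub_cancel_right]
    ring
  · have hj : j = (xs.length : Int) := by omega
    rw [hj, PySem.List.pyRange_one_eq_nil (le_refl _)]
    simp
termination_by (xs.length - j).toNat
decreasing_by omega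

-- ===== VERDICT (by name: the statement is the Claim_ definition above) =====
theorem get_direction_from_bounding_list_spec : Claim_equal_get_direction_from_bounding_list := by
  intro xs _
  unfold Spec_get_direction_from_bounding_list
  match xs with
  | [] =>
    simp [get_direction_from_bounding_list, get_direction_from_bounding_list_alt,
      PySem.List.pyRange_one_eq_nil]
  | first :: rest =>
    have hlen : (1 : Int) ≤ ((first :: rest).length : Int) := by
      simp
    unfold get_direction_from_bounding_list get_direction_from_bounding_list_alt
    rw [pv_telescope (first :: rest) 1 0 (le_refl _) hlen]
    have h0 : PySem.List.pyGetD (first :: rest) (1 - 1) 0 = first := by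
      norm_num [PySem.List.pyGetD_zero_cons]
    have hL : PySem.List.pyGetD (first :: rest) (((first :: rest).length : Int) - 1) 0
        = rest.getLastD first := by
      have hne : (first :: rest) ≠ [] := by simp
      rw [PySem.List.pyGetD_eq_getElem (first :: rest) 0 (by omega) (by omega)]
      have ht : (((first :: rest).length : Int) - 1).toNat = (first :: rest).length - 1 := by
        omega
      simp only [ht]
      rw [← List.getLast_eq_getElem hne, List.getLast_eq_getLastD]
    rw [h0, hL]
    simp only [zero_add]
    by_cases hgt : first - rest.getLastD first > 0
    · simp only [if_pos hgt, if_pos (by omega : first > rest.getLastD first)]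
    · by_cases hlt : first - rest.getLastD first < 0
      · simp only [if_neg hgt, if_pos hlt, if_neg (by omega : ¬ first > rest.getLastD first),
          if_pos (by omega : first < rest.getLastD first)]
      · simp only [if_neg hgt, if_neg hlt, if_neg (by omega : ¬ first > rest.getLastD first),
          if_neg (by omega : ¬ first < rest.getLastD first)]
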